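-- pv_equiv track=rewrite | github.com/yashdchintawar/workshop | Electricity-Bill/electricity_bill.py | unit_price_check
-- ===== SOURCE A (Python) =====
-- def unit_price_check(user_unit):
--     charge_amount = 0
--
--     unit = 1
--     for i in range(50):
--         user_unit -= 1
--         unit += 1
--         if user_unit == 0:
--             break
--
--     unit = 0
--     for i in range(100): # 51-150
--         if user_unit == 0:
--             break
--         user_unit -= 1
--         unit += 1
--     charge_amount += unit * 1
--
--     unit = 0
--     for i in range(100): # 151-250
--         if user_unit == 0:
--             break
--         user_unit -= 1
--         unit += 1
--     charge_amount += unit * 3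
--
--     unit = 0
--     while True: # Above 250 Unit
--         if user_unit == 0:
--             break
--         user_unit -= 1
--         unit += 1
--     charge_amount += unit * 5
--
--     return charge_amount
-- ===== SOURCE B (Python) =====
-- def unit_price_check(user_unit):
--     # closed-form tier arithmetic: clamp each band with min/max, O(1)
--     return (max(min(user_unit - 50, 100), 0) * 1
--             + max(min(user_unit - 150, 100), 0) * 3
--             + max(user_unit - 250, 0) * 5)
-- ===== Notes on version B (the rewrite author's own statement) =====
-- stated objective: faster
-- what changed: Replaced the four unit-by-unit counting loops with closed-form per-band arithmetic (min/max clamping of each tier), O(1) instead of O(n); Pre_ excludes user_unit <= 0, where A's final 'while True' loop never terminates.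
-- outside the precondition, e.g. on unit_price_check(0): A does not finish within the time limit, B returns 0
import Mathlib
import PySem

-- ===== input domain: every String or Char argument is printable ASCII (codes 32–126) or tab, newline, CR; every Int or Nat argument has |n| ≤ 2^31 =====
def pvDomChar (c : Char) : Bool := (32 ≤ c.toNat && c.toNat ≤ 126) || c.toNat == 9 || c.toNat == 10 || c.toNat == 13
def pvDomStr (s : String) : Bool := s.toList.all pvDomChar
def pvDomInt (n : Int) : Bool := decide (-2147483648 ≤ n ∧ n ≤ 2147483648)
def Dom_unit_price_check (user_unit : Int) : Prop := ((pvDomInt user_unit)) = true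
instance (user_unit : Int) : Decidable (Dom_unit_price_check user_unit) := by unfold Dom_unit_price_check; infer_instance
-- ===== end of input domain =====

-- B replaces A's four unit-by-unit counting loops with O(1) closed-form per-band min/max arithmetic.

-- ===== PORT A =====
-- first loop: 'for i in range(50): user_unit -= 1; unit += 1; if user_unit == 0: break'
def pvLoop1 (n : Nat) (u unit : Int) : Int × Int :=
  match n with
  | 0 => (u, unit)
  | n + 1 =>
    let u := u - 1
    let unit := unit + 1
    if u == 0 then (u, unit) else pvLoop1 n u unit

-- second/third loop: 'for i in range(100): if user_unit == 0: break; user_unit -= 1; unit += 1'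
def pvLoop2 (n : Nat) (u unit : Int) : Int × Int :=
  match n with
  | 0 => (u, unit)
  | n + 1 => if u == 0 then (u, unit) else pvLoop2 n (u - 1) (unit + 1)

-- final 'while True' loop; for u < 0 Python diverges (excluded by Pre_), here it stops
def pvWhile (u unit : Int) : Int × Int :=
  if u == 0 then (u, unit)
  else if u < 0 then (u, unit)  -- unreachable under Pre_ (Python diverges here)
  else pvWhile (u - 1) (unit + 1)
termination_by u.toNat
decreasing_by simp_all; omega

def unit_price_check (user_unit : Int) : Int :=
  let charge_amount : Int := 0
  let r1 := pvLoop1 50 user_unit 1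
  let r2 := pvLoop2 100 r1.1 0
  let charge_amount := charge_amount + r2.2 * 1
  let r3 := pvLoop2 100 r2.1 0
  let charge_amount := charge_amount + r3.2 * 3
  let r4 := pvWhile r3.1 0
  charge_amount + r4.2 * 5

-- ===== PORT B =====
def unit_price_check_alt (user_unit : Int) : Int :=
  max (min (user_unit - 50) 100) 0 * 1
    + max (min (user_unit - 150) 100) 0 * 3
    + max (user_unit - 250) 0 * 5

-- ===== PRECONDITION & SPEC =====
-- Pre_ excludes user_unit ≤ 0: there A's final 'while True' loop never terminates (Python diverges).
def Pre_unit_price_check (user_unit : Int) : Prop := 1 ≤ user_unit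
instance (user_unit : Int) : Decidable (Pre_unit_price_check user_unit) := by unfold Pre_unit_price_check; infer_instance
def pvWitness_unit_price_check : Int := 137

def Spec_unit_price_check (user_unit : Int) (out : Int) : Prop := out = unit_price_check_alt user_unit
instance (user_unit : Int) (out : Int) : Decidable (Spec_unit_price_check user_unit out) := by unfold Spec_unit_price_check; infer_instance

-- ===== CLAIM (what is proved, stated in full; the proofs are below) =====
def Claim_equal_unit_price_check : Prop := ∀ (user_unit : Int), Dom_unit_price_check user_unit → Pre_unit_price_check user_unit → Spec_unit_price_check user_unit (unit_price_check user_unit)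

-- ===== LEMMAS AND PROOFS =====
theorem pvLoop1_eq (n : Nat) : ∀ u unit : Int, 1 ≤ u →
    pvLoop1 n u unit = (max (u - n) 0, unit + min u n) := by
  induction n with
  | zero => intro u unit hu; simp [pvLoop1]; omega
  | succ n ih =>
    intro u unit hu
    simp only [pvLoop1]
    by_cases h : u - 1 = 0
    · simp [h]; constructor <;> omega
    · have h1 : 1 ≤ u - 1 := by omega
      simp [h, ih _ _ h1]
      constructor <;> omega

theorem pvLoop2_eq (n : Nat) : ∀ u unit : Int, 0 ≤ u →
    pvLoop2 n u unit = (max (u - n) 0, unit + min u n) := by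
  induction n with
  | zero => intro u unit hu; simp [pvLoop2]; omega
  | succ n ih =>
    intro u unit hu
    simp only [pvLoop2]
    by_cases h : u = 0
    · simp [h]; omega
    · have h1 : 0 ≤ u - 1 := by omega
      simp [h, ih _ _ h1]
      constructor <;> omega

theorem pvWhile_eq (n : Nat) : ∀ (u unit : Int), u = n → pvWhile u unit = (0, unit + u) := by
  induction n with
  | zero => intro u unit h; rw [pvWhile]; simp [h]
  | succ n ih =>
    intro u unit h
    rw [pvWhile]
    have h0 : ¬(u = 0) := by omega
    have h1 : ¬(u < 0) := by omega
    simp only [beq_iff_eq, h0, if_false, h1]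
    rw [ih (u - 1) (unit + 1) (by omega)]
    have : unit + 1 + (u - 1) = unit + u := by omega
    rw [this]

-- ===== VERDICT (by name: the statement is the Claim_ definition above) =====
theorem unit_price_check_spec : Claim_equal_unit_price_check := by
  intro u _ hpre
  have h1 := pvLoop1_eq 50 u 1 hpre
  have h2 := pvLoop2_eq 100 (max (u - 50) 0) 0 (by omega)
  have h3 := pvLoop2_eq 100 (max (max (u - 50) 0 - 100) 0) 0 (by omega)
  have h4 := pvWhile_eq (max (max (max (u - 50) 0 - 100) 0 - 100) 0).toNat
    (max (max (max (u - 50) 0 - 100) 0 - 100) 0) 0 (by omega)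
  unfold Spec_unit_price_check unit_price_check unit_price_check_alt
  push_cast at h1 h2 h3
  simp only [h1, h2, h3, h4]
  omega
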